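-- pv_equiv track=rewrite | github.com/tsunehiko/rlgdg | src/ggdg/utils.py | get_short_tokens
-- ===== SOURCE A (Python) =====
-- def remove_redundant_curly_brackets(rhs_list):
--     new_rhs_list = []
--     tokens_in_brackets = 0
--     in_brackets = False
--     for rhs in rhs_list:
--         if rhs == '"{"':
--             in_brackets = True
--         elif rhs == '"}"' and in_brackets:
--             in_brackets = False
--             if tokens_in_brackets == 1:
--                 new_rhs_list.pop(-2)
--                 continue
--         elif in_brackets:
--             tokens_in_brackets += 1
--         new_rhs_list.append(rhs)
--     return new_rhs_list
--
-- def get_short_tokens(rhs_tokens: list) -> list: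
--     new_rhs = []
--     op = ""
--     if len(rhs_tokens) > 1 and all(
--         t.startswith('"') and t.endswith('"') for t in rhs_tokens
--     ):
--         new_rhs = ['"' + "".join([r[1:-1] for r in rhs_tokens]) + '"']
--     else:
--         rhs_tokens = remove_redundant_curly_brackets(rhs_tokens)
--         num_rhs = len(rhs_tokens)
--         for i in range(num_rhs):
--             if rhs_tokens[i][-1] in ["+", "?"]:
--                 op = rhs_tokens[i][-1]
--                 rhs_tokens[i] = rhs_tokens[i][:-1]
--             else:
--                 op = ""
--             if i == 0 or rhs_tokens[i] != rhs_tokens[i - 1]: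
--                 new_rhs.append(rhs_tokens[i] + op)
--             elif "+" not in new_rhs[-1]:
--                 if new_rhs[-1][-1] == "?":
--                     if op == "+":
--                         new_rhs[-1] = new_rhs[-1][:-1] + "+"
--                 else:
--                     new_rhs[-1] += "+"
--     return new_rhs
-- ===== SOURCE B (Python) =====
-- def _clean_curly(rhs_list):
--     # same curly-bracket cleanup as the original (kept deliberately, incl. its
--     # never-reset tokens_in_brackets counter)
--     new_rhs_list = []
--     tokens_in_brackets = 0
--     in_brackets = False
--     for rhs in rhs_list:
--         if rhs == '"{"':
--             in_brackets = True
--         elif rhs == '"}"' and in_brackets: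
--             in_brackets = False
--             if tokens_in_brackets == 1:
--                 new_rhs_list.pop(-2)
--                 continue
--         elif in_brackets:
--             tokens_in_brackets += 1
--         new_rhs_list.append(rhs)
--     return new_rhs_list
--
--
-- def _collapse(base, ops):
--     # one output token for a maximal run of equal bases, by a closed rule on the ops
--     head = base + ops[0]
--     rest = ops[1:]
--     if "+" in head:
--         return head
--     if head.endswith("?"):
--         return head[:-1] + "+" if "+" in rest else head
--     return head + "+" if rest else head
--
--
-- def get_short_tokens(rhs_tokens: list) -> list:
--     if len(rhs_tokens) > 1 and all(
--         t.startswith('"') and t.endswith('"') for t in rhs_tokens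
--     ):
--         return ['"' + "".join(r[1:-1] for r in rhs_tokens) + '"']
--     pairs = [(t[:-1], t[-1]) if t[-1] in "+?" else (t, "")
--              for t in _clean_curly(rhs_tokens)]
--     out = []
--     i = 0
--     n = len(pairs)
--     while i < n:
--         base = pairs[i][0]
--         ops = [pairs[i][1]]
--         i += 1
--         while i < n and pairs[i][0] == base:
--             ops.append(pairs[i][1])
--             i += 1
--         out.append(_collapse(base, ops))
--     return out
-- ===== Notes on version B (the rewrite author's own statement) =====
-- stated objective: alternative
-- what changed: The incremental merge that looks back into new_rhs[-1] and mutates it is replaced by stripping all tokens into (base, op) pairs up front and then grouping maximal runs of equal bases, emitting one token per run via a closed collapse rule on the run's ops.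
import Mathlib
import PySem

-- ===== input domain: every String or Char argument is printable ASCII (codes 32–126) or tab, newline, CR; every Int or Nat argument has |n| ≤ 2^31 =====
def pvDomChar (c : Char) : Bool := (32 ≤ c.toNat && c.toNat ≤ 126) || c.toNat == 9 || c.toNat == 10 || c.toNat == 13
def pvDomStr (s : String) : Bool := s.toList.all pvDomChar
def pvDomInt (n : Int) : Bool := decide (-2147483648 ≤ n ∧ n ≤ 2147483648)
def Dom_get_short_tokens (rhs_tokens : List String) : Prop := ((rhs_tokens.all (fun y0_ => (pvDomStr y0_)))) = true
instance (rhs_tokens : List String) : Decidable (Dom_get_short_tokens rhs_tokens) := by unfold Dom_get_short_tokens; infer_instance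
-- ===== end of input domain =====

-- B replaces A's lookback-into-output incremental repeat merge by a group-runs-then-decide
-- pass with a closed per-run collapse rule (objective: alternative decomposition, same cost).

-- Shared helper (verbatim identical code in Source A and Source B): the curly-bracket cleanup.
-- Tokens are handled as List Char (PySem.Chars); the entry points convert via toList/String.mk.
def cleanCurly (rhs_list : List (List Char)) : List (List Char) :=
  (rhs_list.foldl
    (fun (st : List (List Char) × Int × Bool) rhs =>
      let acc := st.1; let tib := st.2.1; let inb := st.2.2
      if rhs = ['"', '{', '"'] then (acc ++ [rhs], tib, true)
      else if rhs = ['"', '}', '"'] ∧ inb = true then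
        if tib = 1 then
          -- new_rhs_list.pop(-2); the none case is Python's IndexError (never reached:
          -- the list always holds ≥ 2 elements at this point)
          (match PySem.List.pop? acc (-2) with
           | some (_, acc') => (acc', tib, false)
           | none => (acc, tib, false))
        else (acc ++ [rhs], tib, false)
      else if inb then (acc ++ [rhs], tib + 1, inb)
      else (acc ++ [rhs], tib, inb))
    ([], 0, false)).1

-- Shared helper (identical token-splitting code in both sources): strip a trailing '+'/'?'.
-- Python indexes t[-1]; the none case (empty token) is Python's IndexError, outside Pre_.
def strip1 (t : List Char) : List Char × List Char :=
  match PySem.Chars.pyGet? t (-1) with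
  | some c => if c = '+' ∨ c = '?' then (PySem.Chars.slice t none (some (-1)), [c]) else (t, [])
  | none => (t, [])

-- ===== PORT A =====
-- A's in-place merge of a repeated token into new_rhs[-1] (the elif chain of the loop body).
-- Python reads new_rhs[-1][-1]; endswith is identical for the nonempty strings reached under Pre_.
def stepA (r op : List Char) : List Char :=
  if PySem.Chars.isIn ['+'] r then r
  else if PySem.Chars.endswith r ['?'] then
    (if op = ['+'] then PySem.Chars.slice r none (some (-1)) ++ ['+'] else r)
  else r ++ ['+']

-- A's index loop; rhs_tokens[i-1] at read time is the already-stripped previous token,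
-- carried here as prev (new_rhs[-1][...] mutation = dropLast ++ [stepA …]; getD [] unreachable).
def aLoop : List (List Char) → Option (List Char) → List (List Char) → List (List Char)
  | [], _, newRhs => newRhs
  | t :: rest, prev, newRhs =>
    let p := strip1 t
    if prev ≠ some p.1 then aLoop rest (some p.1) (newRhs ++ [p.1 ++ p.2])
    else aLoop rest (some p.1) (newRhs.dropLast ++ [stepA (newRhs.getLast?.getD []) p.2])

def get_short_tokens (rhs_tokens : List String) : List String :=
  let ts := rhs_tokens.map String.toList
  if 1 < ts.length ∧ ∀ t ∈ ts, PySem.Chars.startswith t ['"'] = true ∧ PySem.Chars.endswith t ['"'] = true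
  then [String.mk (['"'] ++ PySem.Chars.join [] (ts.map (fun r => PySem.Chars.slice r (some 1) (some (-1)))) ++ ['"'])]
  else (aLoop (cleanCurly ts) none []).map String.mk

-- ===== PORT B =====
-- one output token for a maximal run of equal bases, by a closed rule on the run's ops
def collapseB (base op0 : List Char) (rest : List (List Char)) : List Char :=
  let head := base ++ op0
  if PySem.Chars.isIn ['+'] head then head
  else if PySem.Chars.endswith head ['?'] then
    (if rest.contains ['+'] then PySem.Chars.slice head none (some (-1)) ++ ['+'] else head)
  else if rest = [] then head else head ++ ['+']

-- B's grouping scan: peel one maximal run of equal bases, emit its collapsed token, recurse.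
def bRuns : List (List Char × List Char) → List (List Char)
  | [] => []
  | p :: rest =>
    collapseB p.1 p.2 ((rest.takeWhile (fun q => q.1 == p.1)).map Prod.snd)
      :: bRuns (rest.dropWhile (fun q => q.1 == p.1))
  termination_by l => l.length
  decreasing_by
    simp only [List.length_cons]
    exact Nat.lt_succ_of_le (List.length_dropWhile_le _ _)

def get_short_tokens_alt (rhs_tokens : List String) : List String :=
  let ts := rhs_tokens.map String.toList
  if 1 < ts.length ∧ ∀ t ∈ ts, PySem.Chars.startswith t ['"'] = true ∧ PySem.Chars.endswith t ['"'] = true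
  then [String.mk (['"'] ++ PySem.Chars.join [] (ts.map (fun r => PySem.Chars.slice r (some 1) (some (-1)))) ++ ['"'])]
  else (bRuns ((cleanCurly ts).map strip1)).map String.mk

-- ===== PRECONDITION & SPEC =====
-- Pre_ excludes inputs containing an empty-string token: there Python A (and B) raises
-- IndexError at rhs_tokens[i][-1].
def Pre_get_short_tokens (rhs_tokens : List String) : Prop := "" ∉ rhs_tokens
instance (rhs_tokens : List String) : Decidable (Pre_get_short_tokens rhs_tokens) := by
  unfold Pre_get_short_tokens; infer_instance

def pvWitness_get_short_tokens : List String := ["\"a\"", "x+", "x", "y?"]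

def Spec_get_short_tokens (rhs_tokens : List String) (out : List String) : Prop := out = get_short_tokens_alt rhs_tokens
instance (rhs_tokens : List String) (out : List String) : Decidable (Spec_get_short_tokens rhs_tokens out) := by unfold Spec_get_short_tokens; infer_instance

-- ===== CLAIM (what is proved, stated in full; the proofs are below) =====
def Claim_equal_get_short_tokens : Prop := ∀ (rhs_tokens : List String), Dom_get_short_tokens rhs_tokens → Pre_get_short_tokens rhs_tokens → Spec_get_short_tokens rhs_tokens (get_short_tokens rhs_tokens)

-- ===== LEMMAS AND PROOFS =====

lemma isIn_plus_append (s : List Char) : PySem.Chars.isIn ['+'] (s ++ ['+']) = true := by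
  rw [PySem.Chars.isIn_iff_infix]; exact (List.suffix_append s ['+']).isInfix

-- A's incremental merge, folded over the ops of a run, equals B's closed collapse rule.
lemma foldl_stepA (ops : List (List Char)) : ∀ head : List Char,
    ops.foldl stepA head =
      if PySem.Chars.isIn ['+'] head then head
      else if PySem.Chars.endswith head ['?'] then
        (if ops.contains ['+'] then PySem.Chars.slice head none (some (-1)) ++ ['+'] else head)
      else if ops = [] then head else head ++ ['+'] := by
  induction ops with
  | nil => intro head; simp
  | cons op ops ih =>
    intro head
    rw [List.foldl_cons, ih]
    by_cases h1 : PySem.Chars.isIn ['+'] head = true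
    · simp [stepA, h1]
    · by_cases h2 : PySem.Chars.endswith head ['?'] = true
      · by_cases h3 : op = ['+']
        · simp [stepA, h1, h2, h3, isIn_plus_append]
        · simp [stepA, h1, h2, h3, Ne.symm h3]
      · simp [stepA, h1, h2, isIn_plus_append]

lemma collapseB_eq_foldl (base op0 : List Char) (ops : List (List Char)) :
    collapseB base op0 ops = ops.foldl stepA (base ++ op0) := by
  rw [foldl_stepA]; rfl

-- A's loop from a run boundary: front is the settled output, r the token being merged into.
lemma aLoop_run (toks : List (List Char)) : ∀ (front : List (List Char)) (base r : List Char),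
    aLoop toks (some base) (front ++ [r]) =
      front ++ ((toks.takeWhile (fun t => (strip1 t).1 == base)).map (fun t => (strip1 t).2)).foldl stepA r
        :: bRuns ((toks.dropWhile (fun t => (strip1 t).1 == base)).map strip1) := by
  induction toks with
  | nil => intro front base r; simp [aLoop, bRuns]
  | cons t rest ih =>
    intro front base r
    by_cases hb : (strip1 t).1 = base
    · subst hb
      rw [show aLoop (t :: rest) (some (strip1 t).1) (front ++ [r])
            = aLoop rest (some (strip1 t).1)
                ((front ++ [r]).dropLast ++ [stepA ((front ++ [r]).getLast?.getD []) (strip1 t).2]) from by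
        simp [aLoop]]
      rw [List.dropLast_concat, List.getLast?_concat]
      simp only [Option.getD_some]
      rw [ih front (strip1 t).1 (stepA r (strip1 t).2)]
      simp [List.takeWhile_cons, List.dropWhile_cons]
    · have hbeq : ((strip1 t).1 == base) = false := by simp [hb]
      rw [show aLoop (t :: rest) (some base) (front ++ [r])
            = aLoop rest (some (strip1 t).1) ((front ++ [r]) ++ [(strip1 t).1 ++ (strip1 t).2]) from by
        simp [aLoop, Ne.symm hb]]
      rw [ih (front ++ [r]) (strip1 t).1 ((strip1 t).1 ++ (strip1 t).2)]
      simp only [List.takeWhile_cons, List.dropWhile_cons, hbeq, Bool.false_eq_true, if_false,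
        List.map_cons]
      rw [show bRuns (strip1 t :: rest.map strip1)
            = collapseB (strip1 t).1 (strip1 t).2
                (((rest.map strip1).takeWhile (fun q => q.1 == (strip1 t).1)).map Prod.snd)
              :: bRuns ((rest.map strip1).dropWhile (fun q => q.1 == (strip1 t).1)) from by
        simp [bRuns]]
      rw [List.takeWhile_map, List.dropWhile_map, List.map_map, collapseB_eq_foldl]
      simp [Function.comp_def]

-- the whole else branch: A's index loop equals B's run grouping
lemma else_branch_eq (l : List (List Char)) : aLoop l none [] = bRuns (l.map strip1) := by
  cases l with
  | nil => simp [aLoop, bRuns]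
  | cons t rest =>
    rw [show aLoop (t :: rest) none []
          = aLoop rest (some (strip1 t).1) ([] ++ [(strip1 t).1 ++ (strip1 t).2]) from by
      simp [aLoop]]
    rw [aLoop_run rest [] (strip1 t).1 ((strip1 t).1 ++ (strip1 t).2)]
    simp only [List.map_cons]
    rw [show bRuns (strip1 t :: rest.map strip1)
          = collapseB (strip1 t).1 (strip1 t).2
              (((rest.map strip1).takeWhile (fun q => q.1 == (strip1 t).1)).map Prod.snd)
            :: bRuns ((rest.map strip1).dropWhile (fun q => q.1 == (strip1 t).1)) from by
      simp [bRuns]]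
    rw [List.takeWhile_map, List.dropWhile_map, List.map_map, collapseB_eq_foldl]
    simp [Function.comp_def]

-- ===== VERDICT (by name: the statement is the Claim_ definition above) =====
theorem get_short_tokens_spec : Claim_equal_get_short_tokens := by
  intro rhs_tokens _ _
  unfold Spec_get_short_tokens get_short_tokens get_short_tokens_alt
  dsimp only
  split_ifs
  · rfl
  · rw [else_branch_eq]
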